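-- pv_equiv track=rewrite | github.com/haoyudu/bron-kerbosch-for-orbit-clique | LinesOnFermatIntroCode.py | SmallestSkewSet
-- ===== SOURCE A (Python) =====
-- def SmallestSkewSet(X):
--     indexes = [];
--     size = len(X[0]);
--     for i in range(len(X)):
--         if len(X[i]) < size:
--             size = len(X[i]);
--             index = i;
--     for i in range(len(X)):
--         if len(X[i]) == size:
--             indexes.append(i)
--     return size, indexes
-- ===== SOURCE B (Python) =====
-- def SmallestSkewSet(X):
--     size = len(X[0])
--     indexes = []
--     for i, row in enumerate(X):
--         n = len(row)
--         if n < size: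
--             size = n
--             indexes = [i]
--         elif n == size:
--             indexes.append(i)
--     return size, indexes
-- ===== Notes on version B (the rewrite author's own statement) =====
-- stated objective: simpler
-- what changed: A's two sequential passes (find the minimum length, then collect all indices achieving it) are fused into one enumerate pass whose accumulator is reset to [i] on a strict improvement and appended to on a tie.
import Mathlib
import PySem

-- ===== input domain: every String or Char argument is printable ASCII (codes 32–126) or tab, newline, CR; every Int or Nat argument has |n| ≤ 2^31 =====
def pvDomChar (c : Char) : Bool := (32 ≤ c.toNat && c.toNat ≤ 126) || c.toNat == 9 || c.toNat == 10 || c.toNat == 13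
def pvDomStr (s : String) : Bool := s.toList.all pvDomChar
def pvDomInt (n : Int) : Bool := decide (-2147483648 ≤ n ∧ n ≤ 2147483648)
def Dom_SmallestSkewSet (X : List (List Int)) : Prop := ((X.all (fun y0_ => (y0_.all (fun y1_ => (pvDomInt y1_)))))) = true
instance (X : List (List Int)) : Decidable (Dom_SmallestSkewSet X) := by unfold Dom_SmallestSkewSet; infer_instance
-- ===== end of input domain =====

-- B fuses A's two sequential passes (find the minimum row length, then collect
-- all indices achieving it) into one enumerate pass whose index accumulator is
-- reset on a strict improvement and appended to on a tie.

-- ===== PORT A =====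
-- size = len(X[0]); first loop: running strict minimum of the row lengths
-- (the unused `index = i` assignment is dropped); second loop: append every
-- index whose row length equals the minimum.
def SmallestSkewSet (X : List (List Int)) : Int × List Int :=
  let size : Int :=
    X.foldl (fun s r => if (r.length : Int) < s then (r.length : Int) else s)
      ((X.headD []).length : Int)
  let indexes : List Int :=
    X.zipIdx.foldl
      (fun acc p => if (p.1.length : Int) = size then acc ++ [(p.2 : Int)] else acc) []
  (size, indexes)

-- ===== PORT B =====
-- single pass: state (size, indexes); strictly smaller row resets indexes to [i],
-- equal row appends i.
def altGo (k : Nat) (size : Int) (indexes : List Int) : List (List Int) → Int × List Int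
  | [] => (size, indexes)
  | row :: rest =>
    let n : Int := (row.length : Int)
    if n < size then altGo (k + 1) n [(k : Int)] rest
    else if n = size then altGo (k + 1) size (indexes ++ [(k : Int)]) rest
    else altGo (k + 1) size indexes rest

def SmallestSkewSet_alt (X : List (List Int)) : Int × List Int :=
  altGo 0 ((X.headD []).length : Int) [] X

-- ===== PRECONDITION & SPEC =====
-- A evaluates len(X[0]) first, which raises IndexError on X = []; Pre_ excludes exactly that.
def Pre_SmallestSkewSet (X : List (List Int)) : Prop := X ≠ []
instance (X : List (List Int)) : Decidable (Pre_SmallestSkewSet X) := by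
  unfold Pre_SmallestSkewSet; infer_instance
def pvWitness_SmallestSkewSet : List (List Int) := [[1, 2], [3]]

def Spec_SmallestSkewSet (X : List (List Int)) (out : Int × List Int) : Prop :=
  out = SmallestSkewSet_alt X
instance (X : List (List Int)) (out : Int × List Int) : Decidable (Spec_SmallestSkewSet X out) := by
  unfold Spec_SmallestSkewSet; infer_instance

-- ===== CLAIM (what is proved, stated in full; the proofs are below) =====
def Claim_equal_SmallestSkewSet : Prop :=
  ∀ (X : List (List Int)), Dom_SmallestSkewSet X → Pre_SmallestSkewSet X →
    Spec_SmallestSkewSet X (SmallestSkewSet X)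

-- ===== LEMMAS AND PROOFS =====

-- running minimum of the row lengths, seeded with s
def minF (L : List (List Int)) (s : Int) : Int :=
  L.foldl (fun t r => if (r.length : Int) < t then (r.length : Int) else t) s

-- indices (offset k) whose row length equals m
def filt (k : Nat) (L : List (List Int)) (m : Int) : List Int :=
  match L with
  | [] => []
  | r :: rest => (if (r.length : Int) = m then [(k : Int)] else []) ++ filt (k + 1) rest m

theorem minF_le (L : List (List Int)) (s : Int) : minF L s ≤ s := by
  induction L generalizing s with
  | nil => simp [minF]
  | cons r rest ih =>
    simp only [minF, List.foldl_cons]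
    split_ifs with h
    · exact le_trans (ih _) (le_of_lt h)
    · exact ih s

theorem loop2_eq_filt (L : List (List Int)) (m : Int) :
    ∀ (k : Nat) (acc : List Int),
      (L.zipIdx k).foldl
        (fun acc p => if (p.1.length : Int) = m then acc ++ [(p.2 : Int)] else acc) acc
      = acc ++ filt k L m := by
  induction L with
  | nil => intro k acc; simp [filt]
  | cons r rest ih =>
    intro k acc
    simp only [List.zipIdx_cons, List.foldl_cons, filt]
    split_ifs with h <;> simp [ih (k + 1)]

theorem altGo_spec (L : List (List Int)) :
    ∀ (k : Nat) (s : Int) (acc : List Int),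
      altGo k s acc L
        = (minF L s, if minF L s < s then filt k L (minF L s) else acc ++ filt k L (minF L s)) := by
  induction L with
  | nil => intro k s acc; simp [altGo, minF, filt]
  | cons r rest ih =>
    intro k s acc
    have hle : ∀ t : Int, minF rest t ≤ t := fun t => minF_le rest t
    by_cases h1 : (r.length : Int) < s
    · -- strict improvement: reset
      simp only [altGo, h1, if_pos, minF, List.foldl_cons, filt]
      rw [show (altGo (k+1) ((r.length : Int)) [(k : Int)] rest)
            = (minF rest (r.length : Int),
               if minF rest (r.length : Int) < (r.length : Int)
               then filt (k+1) rest (minF rest (r.length : Int))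
               else [(k : Int)] ++ filt (k+1) rest (minF rest (r.length : Int)))
          from ih (k+1) (r.length : Int) [(k : Int)]]
      have hm := hle (r.length : Int)
      by_cases h2 : minF rest (r.length : Int) < (r.length : Int)
      · have hne : (r.length : Int) ≠ minF rest (r.length : Int) := by omega
        have hlt : minF rest (r.length : Int) < s := by omega
        simp [minF] at h2 hne hlt ⊢
        simp [h2, hne, hlt]
      · have heq : minF rest (r.length : Int) = (r.length : Int) := le_antisymm hm (not_lt.mp h2)
        have hlt : minF rest (r.length : Int) < s := by omega
        simp [minF] at heq hlt ⊢
        simp [heq, h1]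
    · by_cases h2 : (r.length : Int) = s
      · -- tie: append k
        subst h2
        simp only [altGo, lt_irrefl, if_false, ite_self, minF, List.foldl_cons, filt]
        rw [show (altGo (k+1) (r.length : Int) (acc ++ [(k : Int)]) rest)
              = (minF rest (r.length : Int),
                 if minF rest (r.length : Int) < (r.length : Int)
                 then filt (k+1) rest (minF rest (r.length : Int))
                 else (acc ++ [(k : Int)]) ++ filt (k+1) rest (minF rest (r.length : Int)))
            from ih (k+1) (r.length : Int) (acc ++ [(k : Int)])]
        have hm := hle (r.length : Int)
        by_cases h3 : minF rest (r.length : Int) < (r.length : Int)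
        · have hne : (r.length : Int) ≠ minF rest (r.length : Int) := by omega
          simp [minF] at h3 hne ⊢
          simp [h3, hne]
        · have heq : minF rest (r.length : Int) = (r.length : Int) := le_antisymm hm (not_lt.mp h3)
          simp [minF] at h3 heq ⊢
          simp [heq]
      · -- strictly larger: skip
        simp only [altGo, h1, h2, if_neg, not_false_iff, minF, List.foldl_cons, filt]
        rw [show (altGo (k+1) s acc rest)
              = (minF rest s,
                 if minF rest s < s then filt (k+1) rest (minF rest s)
                 else acc ++ filt (k+1) rest (minF rest s))
            from ih (k+1) s acc]
        have hm := hle s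
        have hne : (r.length : Int) ≠ minF rest s := by
          have : s ≤ (r.length : Int) := not_lt.mp h1
          omega
        simp [minF] at hm hne ⊢
        simp [hne]

-- ===== VERDICT (by name: the statement is the Claim_ definition above) =====
theorem SmallestSkewSet_spec : Claim_equal_SmallestSkewSet := by
  intro X _ _
  unfold Spec_SmallestSkewSet SmallestSkewSet SmallestSkewSet_alt
  rw [altGo_spec X 0 ((X.headD []).length : Int) []]
  simp only [List.nil_append, ite_self, Prod.mk.injEq]
  refine ⟨rfl, ?_⟩
  have h2 := loop2_eq_filt X (minF X ((X.headD []).length : Int)) 0 []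
  simp only [minF, List.nil_append] at h2 ⊢
  exact h2
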